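-- pv_equiv track=rewrite | github.com/dbsgh431/Spike_codingTest | Spike/사탕 게임.py | check_vertical
-- ===== SOURCE A (Python) =====
-- def check_vertical(j, n_list):
--
--     stack = [n_list[0][j]]
--     count = 1
--     stack_count = [0]
--     for k in range(1, len(n_list)):
--         if stack[-1] == n_list[k][j]:
--             count += 1
--         else:
--             stack_count[0] = max(stack_count[0], count)
--             count = 1
--             stack.clear()
--         stack.append(n_list[k][j])
--     stack_count[0] = max(stack_count[0], count)
--     return max(stack_count)
-- ===== SOURCE B (Python) =====
-- def _runs(col):
--     # maximal-run lengths of consecutive equal values in col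
--     if not col:
--         return []
--     v = col[0]
--     k = 1
--     while k < len(col) and col[k] == v:
--         k += 1
--     return [k] + _runs(col[k:])
--
--
-- def check_vertical(j, n_list):
--     col = [row[j] for row in n_list]
--     return max(_runs(col), default=0)
-- ===== Notes on version B (the rewrite author's own statement) =====
-- stated objective: simpler
-- what changed: B extracts the column once and partitions it into maximal runs of equal values (a recursive group-then-aggregate pass), returning the longest run length, instead of A's in-loop stack/count/stack_count bookkeeping.
import Mathlib
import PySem

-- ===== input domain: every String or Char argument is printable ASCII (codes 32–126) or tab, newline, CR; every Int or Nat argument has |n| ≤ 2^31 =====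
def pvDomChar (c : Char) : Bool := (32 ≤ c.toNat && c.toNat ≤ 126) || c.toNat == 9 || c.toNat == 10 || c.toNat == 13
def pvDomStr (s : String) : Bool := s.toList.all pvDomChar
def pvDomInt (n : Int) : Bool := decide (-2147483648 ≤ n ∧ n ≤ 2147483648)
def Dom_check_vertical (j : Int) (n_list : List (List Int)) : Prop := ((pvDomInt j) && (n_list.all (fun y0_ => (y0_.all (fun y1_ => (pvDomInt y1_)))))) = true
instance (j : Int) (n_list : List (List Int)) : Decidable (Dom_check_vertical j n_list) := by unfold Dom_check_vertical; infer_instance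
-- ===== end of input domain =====

-- B replaces A's stack/count/stack_count bookkeeping with a group-into-runs pass over the
-- extracted column (objective: simpler decomposition; no speed claim).

-- ===== PORT A =====
-- pyGetD defaults are never reached under Pre_check_vertical (nonempty list, j in range in every row).
def check_vertical (j : Int) (n_list : List (List Int)) : Int :=
  let stack : List Int := [PySem.List.pyGetD (PySem.List.pyGetD n_list 0 []) j 0]
  let st := (PySem.List.pyRange 1 (PySem.List.len n_list)).foldl
    (fun (s : List Int × Int × List Int) (k : Int) =>
      let v := PySem.List.pyGetD (PySem.List.pyGetD n_list k []) j 0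
      if PySem.List.pyGetD s.1 (-1) 0 = v then
        (s.1 ++ [v], s.2.1 + 1, s.2.2)
      else
        (([] : List Int) ++ [v], 1,
          PySem.List.pySetD s.2.2 0 (max (PySem.List.pyGetD s.2.2 0 0) s.2.1)))
    (stack, 1, ([0] : List Int))
  let sc := PySem.List.pySetD st.2.2 0 (max (PySem.List.pyGetD st.2.2 0 0) st.2.1)
  (PySem.List.max? sc (fun y => y)).getD 0

-- ===== PORT B =====
-- length of the run of values equal to v at the front of the list (B's inner while-loop)
def pvRunLen (v : Int) : List Int → Nat
  | [] => 0
  | x :: xs => if x = v then 1 + pvRunLen v xs else 0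

-- B's _runs: lengths of the maximal runs of consecutive equal values
def pvRuns : List Int → List Int
  | [] => []
  | v :: rest =>
      let k := pvRunLen v rest
      ((1 + k : Nat) : Int) :: pvRuns (rest.drop k)
  termination_by l => l.length
  decreasing_by
    simp only [List.length_cons, List.length_drop]
    omega

def check_vertical_alt (j : Int) (n_list : List (List Int)) : Int :=
  let col := n_list.map (fun row => PySem.List.pyGetD row j 0)
  PySem.List.maxD (pvRuns col) (fun y => y) 0

-- ===== PRECONDITION & SPEC =====
-- Pre_ excludes exactly the inputs where A raises IndexError: the empty list (n_list[0] fails)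
-- and any j out of range for some row (n_list[k][j] fails).
def Pre_check_vertical (j : Int) (n_list : List (List Int)) : Prop :=
  n_list ≠ [] ∧ ∀ row ∈ n_list, PySem.Raise.InRange row.length j
instance (j : Int) (n_list : List (List Int)) : Decidable (Pre_check_vertical j n_list) := by
  unfold Pre_check_vertical; infer_instance

def pvWitness_check_vertical : Int × List (List Int) := (0, [[1], [1], [2]])

def Spec_check_vertical (j : Int) (n_list : List (List Int)) (out : Int) : Prop := out = check_vertical_alt j n_list
instance (j : Int) (n_list : List (List Int)) (out : Int) : Decidable (Spec_check_vertical j n_list out) := by unfold Spec_check_vertical; infer_instance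

-- ===== CLAIM (what is proved, stated in full; the proofs are below) =====
def Claim_equal_check_vertical : Prop := ∀ (j : Int) (n_list : List (List Int)), Dom_check_vertical j n_list → Pre_check_vertical j n_list → Spec_check_vertical j n_list (check_vertical j n_list)

-- ===== LEMMAS AND PROOFS =====

-- A's loop state transition, phrased on the column value directly
def pvStepV (s : List Int × Int × List Int) (v : Int) : List Int × Int × List Int :=
  if PySem.List.pyGetD s.1 (-1) 0 = v then
    (s.1 ++ [v], s.2.1 + 1, s.2.2)
  else
    (([] : List Int) ++ [v], 1,
      PySem.List.pySetD s.2.2 0 (max (PySem.List.pyGetD s.2.2 0 0) s.2.1))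

def pvFinalize (st : List Int × Int × List Int) : Int :=
  let sc := PySem.List.pySetD st.2.2 0 (max (PySem.List.pyGetD st.2.2 0 0) st.2.1)
  (PySem.List.max? sc (fun y => y)).getD 0

theorem pvRuns_cons (v : Int) (rest : List Int) :
    pvRuns (v :: rest) =
      ((1 + pvRunLen v rest : Nat) : Int) :: pvRuns (rest.drop (pvRunLen v rest)) := by
  rw [pvRuns]

-- reference recursion: best-so-far b, current run of value p with length c, remaining vs
def pvMaxRun (p c b : Int) : List Int → Int
  | [] => max b c
  | v :: vs => if p = v then pvMaxRun v (c + 1) b vs else pvMaxRun v 1 (max b c) vs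

theorem pvSetD_singleton (b x : Int) : PySem.List.pySetD [b] 0 x = [x] := by
  have h := PySem.List.pySet?_natCast (xs := [b]) (v := x) (n := 0) (by simp)
  simp [PySem.List.pySetD] at h ⊢
  simp [h]

theorem pvFinalize_eq (t : List Int) (c b : Int) :
    pvFinalize (t, c, [b]) = max b c := by
  simp [pvFinalize, pvSetD_singleton, PySem.List.pyGetD_zero_cons, PySem.List.max?_id_cons,
    List.foldl]

theorem pvLoopA (vs : List Int) : ∀ (t : List Int) (p c b : Int),
    pvFinalize (vs.foldl pvStepV (t ++ [p], c, [b])) = pvMaxRun p c b vs := by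
  induction vs with
  | nil => intro t p c b; simp [pvMaxRun, pvFinalize_eq]
  | cons v vs ih =>
    intro t p c b
    simp only [List.foldl_cons, pvStepV, PySem.List.pyGetD_neg_one_append_singleton, pvMaxRun]
    by_cases h : p = v
    · simp only [h, if_pos rfl]
      have := ih (t ++ [v]) v (c + 1) b
      simpa [List.append_assoc] using this
    · simp only [if_neg h, PySem.List.pyGetD_zero_cons, pvSetD_singleton, List.nil_append]
      exact ih [] v 1 (max b c)

theorem pvRunsR (vs : List Int) : ∀ (p c b : Int),
    pvMaxRun p c b vs =
      ((c + (pvRunLen p vs : Int)) :: pvRuns (vs.drop (pvRunLen p vs))).foldl max b := by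
  induction vs with
  | nil => intro p c b; simp [pvMaxRun, pvRunLen, pvRuns, List.foldl]
  | cons v vs ih =>
    intro p c b
    by_cases h : p = v
    · subst h
      have hd : List.drop (1 + pvRunLen p vs) (p :: vs) = List.drop (pvRunLen p vs) vs := by
        rw [Nat.add_comm, List.drop_succ_cons]
      have h1 : pvRunLen p (p :: vs) = 1 + pvRunLen p vs := by simp [pvRunLen]
      rw [pvMaxRun, if_pos rfl, ih, h1, hd]
      congr 2
      push_cast
      ring
    · have h0 : pvRunLen p (v :: vs) = 0 := by simp [pvRunLen, Ne.symm h]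
      rw [pvMaxRun, if_neg h, ih, h0]
      simp only [Nat.cast_zero, add_zero, List.drop_zero, List.foldl_cons, pvRuns_cons]
      congr 2 <;> (push_cast; try ring)

theorem pvFoldMax_head (h : Int) (t : List Int) (hh : 0 ≤ h) :
    List.foldl max 0 (h :: t) = List.foldl max h t := by
  simp [List.foldl_cons, max_eq_right hh]

theorem pvA_eq (j : Int) (r : List Int) (rs : List (List Int)) :
    check_vertical j (r :: rs) =
      List.foldl max 0 (pvRuns ((r :: rs).map (fun row => PySem.List.pyGetD row j 0))) := by
  have h0 : check_vertical j (r :: rs) =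
      pvFinalize ((PySem.List.pyRange 1 (PySem.List.len (r :: rs))).foldl
        (fun s k => pvStepV s
          (PySem.List.pyGetD (PySem.List.pyGetD (r :: rs) k ([] : List Int)) j 0))
        (([PySem.List.pyGetD (PySem.List.pyGetD (r :: rs) 0 []) j 0] : List Int), 1,
          ([0] : List Int))) := rfl
  rw [h0,
    PySem.List.foldl_pyRange_pyGetD (r :: rs) ([] : List Int)
      (fun s row => pvStepV s (PySem.List.pyGetD row j 0)) _ (by norm_num)]
  have h1 : List.drop (Int.toNat 1) (r :: rs) = rs := by simp
  rw [h1, ← List.foldl_map, PySem.List.pyGetD_zero_cons]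
  have h2 := pvLoopA (rs.map (fun row => PySem.List.pyGetD row j 0)) []
    (PySem.List.pyGetD r j 0) 1 0
  simp only [List.nil_append] at h2
  rw [h2, List.map_cons, pvRuns_cons, pvRunsR]
  norm_cast

theorem pvB_eq (j : Int) (r : List Int) (rs : List (List Int)) :
    check_vertical_alt j (r :: rs) =
      List.foldl max 0 (pvRuns ((r :: rs).map (fun row => PySem.List.pyGetD row j 0))) := by
  show PySem.List.maxD (pvRuns ((r :: rs).map (fun row => PySem.List.pyGetD row j 0)))
    (fun y => y) 0 = _
  unfold PySem.List.maxD
  rw [List.map_cons, pvRuns_cons, PySem.List.max?_id_cons, Option.getD_some,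
    pvFoldMax_head _ _ (by positivity)]

-- ===== VERDICT =====
theorem check_vertical_spec : Claim_equal_check_vertical := by
  intro j n_list _ hpre
  unfold Spec_check_vertical
  obtain ⟨hne, -⟩ := hpre
  cases n_list with
  | nil => exact absurd rfl hne
  | cons r rs => rw [pvA_eq, pvB_eq]
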